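-- pv_equiv track=rewrite | github.com/EdouardPradie/Cryptographie | src/utils/Aes_cipher/Aes.py | get_matrix_from_string
-- ===== SOURCE A (Python) =====
-- def big_indian(string : str):
--     i : int = 0
--     result : str = ""
--
--     string = string.replace("0x", "")
--     if (len(string) % 2 == 1):
--         string = "0" + string
--     while (i < len(string)):
--         result += string[i + 1]
--         result += string[i]
--         i += 2
--     return result
--
-- def get_matrix_from_string(string : str):
--     matrix : list(list(str)) = [["", "", "", ""], ["", "", "", ""], ["", "", "", ""], ["", "", "", ""]]
--     i : int = 0
--     idx_i : int = 0
--     idx_x : int = 0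
--     idx_y : int = 0
--
--     string = big_indian(string)
--     while (i < len(string)):
--         matrix[idx_y][idx_x] += string[i]
--         idx_i += 1
--         if (idx_i == 2):
--             idx_i = 0
--             idx_x += 1
--         if (idx_x == 4):
--             idx_x = 0
--             idx_y += 1
--         if (idx_y == 4):
--             break
--         i += 1
--     return matrix
-- ===== SOURCE B (Python) =====
-- def big_indian(string: str):
--     s = string.replace("0x", "")
--     if len(s) % 2 == 1:
--         s = "0" + s
--     return "".join(s[i + 1] + s[i] for i in range(0, len(s), 2))
--
--
-- def get_matrix_from_string(string: str):
--     s = big_indian(string)[:32]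
--     cells = [s[i:i + 2] for i in range(0, len(s), 2)]
--     cells += [""] * (16 - len(cells))
--     return [cells[4 * r:4 * r + 4] for r in range(4)]
-- ===== Notes on version B (the rewrite author's own statement) =====
-- stated objective: simpler
-- what changed: Replaces A's char-by-char while loop threading five counters (i, idx_i, idx_x, idx_y with an in-place matrix mutation and a break) by a flat pipeline: take the first 32 chars of big_indian(string), chunk into 2-char cells by slicing, pad to 16 cells, and reshape row-major into 4 rows; big_indian's accumulator loop likewise becomes a join over a step-2 range.
import Mathlib
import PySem

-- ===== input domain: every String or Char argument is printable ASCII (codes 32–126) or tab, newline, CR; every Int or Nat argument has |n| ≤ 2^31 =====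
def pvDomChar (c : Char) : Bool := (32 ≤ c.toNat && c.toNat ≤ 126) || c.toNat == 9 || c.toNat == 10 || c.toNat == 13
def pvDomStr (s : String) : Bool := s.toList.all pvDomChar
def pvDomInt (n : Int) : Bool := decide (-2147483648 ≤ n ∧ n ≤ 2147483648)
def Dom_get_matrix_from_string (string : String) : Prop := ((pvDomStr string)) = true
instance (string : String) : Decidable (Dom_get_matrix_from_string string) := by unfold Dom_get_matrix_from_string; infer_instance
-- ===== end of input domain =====

-- B replaces A's char-by-char loop threading four counters with a flat slice-chunk-pad-reshape
-- pipeline (objective: simpler).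

-- ===== PORT A =====
-- big_indian's while loop: i advances by 2; the index i+1 is always in range because the
-- string has even length after the '0'-padding, so `.getD '0'` is never the default.
def pvBigLoopA (s : List Char) (i : Nat) (result : List Char) : List Char :=
  if i < s.length then
    pvBigLoopA s (i + 2)
      ((result ++ [(PySem.List.pyGet? s ((i : Int) + 1)).getD '0'])
        ++ [(PySem.List.pyGet? s (i : Int)).getD '0'])
  else result
termination_by s.length - i

def pvBigIndianA (s0 : List Char) : List Char :=
  let s1 := PySem.Chars.replace s0 "0x".toList "".toList
  let s := if s1.length % 2 = 1 then '0' :: s1 else s1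
  pvBigLoopA s 0 []

-- the matrix-filling while loop; cells kept as List Char ('+=' of one char = append)
def pvMatLoopA (s : List Char) (i : Nat) (m : List (List (List Char)))
    (idxI idxX idxY : Nat) : List (List (List Char)) :=
  if i < s.length then
    let c := (PySem.List.pyGet? s (i : Int)).getD '0'
    let m' := m.modify idxY (fun row => row.modify idxX (fun cell => cell ++ [c]))
    let p : Nat × Nat := if idxI + 1 = 2 then (0, idxX + 1) else (idxI + 1, idxX)
    let q : Nat × Nat := if p.2 = 4 then (0, idxY + 1) else (p.2, idxY)
    if q.2 = 4 then m' else pvMatLoopA s (i + 1) m' p.1 q.1 q.2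
  else m
termination_by s.length - i

def get_matrix_from_string (string : String) : List (List String) :=
  let m0 : List (List (List Char)) := [[[], [], [], []], [[], [], [], []], [[], [], [], []], [[], [], [], []]]
  let s := pvBigIndianA string.toList
  (pvMatLoopA s 0 m0 0 0 0).map (·.map String.ofList)

-- ===== PORT B =====
def pvBigIndianB (s0 : List Char) : List Char :=
  let s1 := PySem.Chars.replace s0 "0x".toList "".toList
  let s := if s1.length % 2 = 1 then '0' :: s1 else s1
  PySem.Chars.join []
    ((PySem.List.pyRange 0 s.length 2).map (fun i =>
      [(PySem.List.pyGet? s (i + 1)).getD '0', (PySem.List.pyGet? s i).getD '0']))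

def get_matrix_from_string_alt (string : String) : List (List String) :=
  let s := PySem.List.slice (pvBigIndianB string.toList) none (some 32)
  let cells := (PySem.List.pyRange 0 s.length 2).map
    (fun i => PySem.List.slice s (some i) (some (i + 2)))
  let cells := cells ++ List.replicate (16 - cells.length) ([] : List Char)
  (PySem.List.pyRange 0 4 1).map (fun r =>
    (PySem.List.slice cells (some (4 * r)) (some (4 * r + 4))).map String.ofList)

-- ===== PRECONDITION & SPEC =====
def Spec_get_matrix_from_string (string : String) (out : List (List String)) : Prop := out = get_matrix_from_string_alt string
instance (string : String) (out : List (List String)) : Decidable (Spec_get_matrix_from_string string out) := by unfold Spec_get_matrix_from_string; infer_instance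

-- ===== CLAIM (what is proved, stated in full; the proofs are below) =====
def Claim_equal_get_matrix_from_string : Prop := ∀ (string : String), Dom_get_matrix_from_string string → Spec_get_matrix_from_string string (get_matrix_from_string string)

-- ===== LEMMAS AND PROOFS =====

-- canonical byte-swap of consecutive pairs
def pvSwapPairs : List Char → List Char
  | a :: b :: t => b :: a :: pvSwapPairs t
  | t => t

-- canonical 2-char chunking
def pvCellsOf : List Char → List (List Char)
  | a :: b :: t => [a, b] :: pvCellsOf t
  | _ => []

-- canonical sequential cell placement into the 4×4 matrix, stopping after cell 15
def pvFill (m : List (List (List Char))) (p : Nat) : List (List Char) → List (List (List Char))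
  | [] => m
  | c :: cs => if p < 16 then pvFill (m.modify (p / 4) (·.modify (p % 4) (· ++ c))) (p + 1) cs else m



theorem pvSwapPairs_length (t : List Char) : (pvSwapPairs t).length = t.length := by
  match t with
  | [] => rfl
  | [a] => rfl
  | a :: b :: t => simp [pvSwapPairs, pvSwapPairs_length t]

theorem pvFill_16 (m : List (List (List Char))) (cs : List (List Char)) :
    pvFill m 16 cs = m := by
  cases cs with
  | nil => rfl
  | cons c cs => simp [pvFill]

theorem pvFill_step (m : List (List (List Char))) (p : Nat) (hp : p < 16)
    (c : List Char) (cs : List (List Char)) :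
    pvFill m p (c :: cs) = pvFill (m.modify (p / 4) (·.modify (p % 4) (· ++ c))) (p + 1) cs := by
  simp [pvFill, hp]

theorem pvMTIgo {α : Type} (l : List α) (n : Nat) (f g : List α → List α) :
    List.modifyTailIdx.go f n (List.modifyTailIdx.go g n l)
      = List.modifyTailIdx.go (fun t => f (g t)) n l := by
  induction l generalizing n with
  | nil => cases n <;> simp [List.modifyTailIdx.go]
  | cons a l ih => cases n <;> simp [List.modifyTailIdx.go, ih]

theorem pvMTI {α : Type} (l : List α) (n : Nat) (f g : List α → List α) :
    (l.modifyTailIdx n g).modifyTailIdx n f = l.modifyTailIdx n (fun t => f (g t)) := by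
  simp only [List.modifyTailIdx]
  exact pvMTIgo l n f g

theorem pvModify_modify {α : Type} (l : List α) (n : Nat) (f g : α → α) :
    (l.modify n g).modify n f = l.modify n (fun a => f (g a)) := by
  simp only [List.modify]
  rw [pvMTI]
  congr 1
  funext t
  cases t <;> simp

theorem pvModify_merge (m : List (List (List Char))) (y x : Nat) (a b : Char) :
    ((m.modify y (fun row => row.modify x (fun cell => cell ++ [a]))).modify y
        (fun row => row.modify x (fun cell => cell ++ [b])))
      = m.modify y (fun row => row.modify x (fun cell => cell ++ [a, b])) := by
  rw [pvModify_modify]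
  congr 1
  funext row
  rw [pvModify_modify]
  congr 1
  funext cell
  simp

theorem pvCast_succ (i : Nat) : (i : Int) + 1 = ((i + 1 : Nat) : Int) := by push_cast; ring

theorem pvCast_two (i : Nat) : (i : Int) + 2 = ((i + 2 : Nat) : Int) := by push_cast; ring

theorem pvGetD_eq (s : List Char) (i : Nat) (h : i < s.length) :
    (PySem.List.pyGet? s (i : Int)).getD '0' = s[i] := by
  rw [PySem.List.pyGet?_natCast, List.getElem?_eq_getElem h, Option.getD_some]

theorem pvBigLoopA_spec (s : List Char) (hs : s.length % 2 = 0) (i : Nat) (r : List Char)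
    (hi : i % 2 = 0) : pvBigLoopA s i r = r ++ pvSwapPairs (s.drop i) := by
  rw [pvBigLoopA]
  by_cases h : i < s.length
  · have h1 : i + 1 < s.length := by omega
    rw [if_pos h, pvBigLoopA_spec s hs (i + 2) _ (by omega)]
    have hd : s.drop i = s[i] :: s[i + 1] :: s.drop (i + 2) := by
      rw [List.drop_eq_getElem_cons h, List.drop_eq_getElem_cons h1]
    rw [hd, pvCast_succ, pvGetD_eq s (i + 1) h1, pvGetD_eq s i h]
    simp [pvSwapPairs]
  · rw [if_neg h, List.drop_eq_nil_of_le (by omega)]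
    simp [pvSwapPairs]
termination_by s.length - i

theorem pvRange2_cons (a b : Int) (h : a < b) :
    PySem.List.pyRange a b 2 = a :: PySem.List.pyRange (a + 2) b 2 := by
  rw [PySem.List.pyRange_of_pos a b (by norm_num), PySem.List.pyRange_of_pos (a + 2) b (by norm_num)]
  rw [if_pos h]
  have hcnt : ((b - a + 2 - 1) / 2).toNat = ((b - (a + 2) + 2 - 1) / 2).toNat + 1 := by omega
  rw [hcnt, List.range_succ_eq_map]
  by_cases h2 : a + 2 < b
  · rw [if_pos h2]
    simp only [List.map_cons, List.map_map, Function.comp_def, Nat.cast_zero]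
    congr 1
    · norm_num
    · apply List.map_congr_left
      intro k _
      push_cast
      ring
  · rw [if_neg h2]
    have hz : ((b - (a + 2) + 2 - 1) / 2).toNat = 0 := by omega
    simp [hz]

theorem pvRange2_nil (a b : Int) (h : b ≤ a) : PySem.List.pyRange a b 2 = [] := by
  rw [PySem.List.pyRange_of_pos a b (by norm_num), if_neg (by omega)]
  simp

theorem pvJoinNilFlatten (l : List (List Char)) : PySem.Chars.join [] l = l.flatten := by
  match l with
  | [] => simp [PySem.Chars.join_nil]
  | [a] => simp [PySem.Chars.join_singleton]
  | a :: b :: t =>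
    rw [PySem.Chars.join_cons_cons]
    simp [pvJoinNilFlatten (b :: t)]

theorem pvFlatB (s : List Char) (hs : s.length % 2 = 0) (i : Nat) (hi : i % 2 = 0) :
    ((PySem.List.pyRange (i : Int) (s.length : Int) 2).map (fun j =>
        [(PySem.List.pyGet? s (j + 1)).getD '0', (PySem.List.pyGet? s j).getD '0'])).flatten
      = pvSwapPairs (s.drop i) := by
  by_cases h : i < s.length
  · have h1 : i + 1 < s.length := by omega
    rw [pvRange2_cons _ _ (by exact_mod_cast h), List.map_cons, List.flatten_cons]
    rw [pvCast_two, pvFlatB s hs (i + 2) (by omega)]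
    have hd : s.drop i = s[i] :: s[i + 1] :: s.drop (i + 2) := by
      rw [List.drop_eq_getElem_cons h, List.drop_eq_getElem_cons h1]
    rw [hd, pvCast_succ, pvGetD_eq s (i + 1) h1, pvGetD_eq s i h]
    simp [pvSwapPairs]
  · rw [pvRange2_nil _ _ (by exact_mod_cast Nat.le_of_not_lt h),
      List.drop_eq_nil_of_le (by omega)]
    rfl
termination_by s.length - i

theorem pvPad_even (s1 : List Char) :
    (if s1.length % 2 = 1 then '0' :: s1 else s1).length % 2 = 0 := by
  by_cases h : s1.length % 2 = 1 <;> simp [h] <;> omega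

theorem pvBandA (s : List Char) (hs : s.length % 2 = 0) :
    PySem.Chars.join []
      ((PySem.List.pyRange 0 (s.length : Int) 2).map (fun i =>
        [(PySem.List.pyGet? s (i + 1)).getD '0', (PySem.List.pyGet? s i).getD '0']))
      = pvBigLoopA s 0 [] := by
  rw [pvJoinNilFlatten, pvBigLoopA_spec s hs 0 [] rfl]
  have h0 : (0 : Int) = ((0 : Nat) : Int) := rfl
  rw [h0, pvFlatB s hs 0 rfl]
  simp

theorem pvBigIndianB_eq (s0 : List Char) : pvBigIndianB s0 = pvBigIndianA s0 := by
  simp only [pvBigIndianB, pvBigIndianA]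
  exact pvBandA _ (pvPad_even _)

theorem pvBigIndianA_even (s0 : List Char) : (pvBigIndianA s0).length % 2 = 0 := by
  simp only [pvBigIndianA]
  rw [pvBigLoopA_spec _ (pvPad_even _) 0 [] rfl]
  simp [pvSwapPairs_length, pvPad_even]

theorem pvMatLoopA_spec (s : List Char) (hs : s.length % 2 = 0) :
    ∀ n i m x y, s.length - i ≤ n → i % 2 = 0 → x < 4 → y < 4 →
      pvMatLoopA s i m 0 x y = pvFill m (4 * y + x) (pvCellsOf (s.drop i)) := by
  intro n
  induction n with
  | zero =>
    intro i m x y hn hi hx hy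
    rw [pvMatLoopA, if_neg (by omega), List.drop_eq_nil_of_le (by omega)]
    rfl
  | succ n ih =>
    intro i m x y hn hi hx hy
    by_cases h : i < s.length
    case neg => rw [pvMatLoopA, if_neg h, List.drop_eq_nil_of_le (by omega)]; rfl
    case pos =>
    have h1 : i + 1 < s.length := by omega
    have hd : s.drop i = s[i] :: s[i + 1] :: s.drop (i + 2) := by
      rw [List.drop_eq_getElem_cons h, List.drop_eq_getElem_cons h1]
    rw [hd]
    simp only [pvCellsOf]
    rw [pvFill_step m _ (by omega)]
    have hdiv : (4 * y + x) / 4 = y := by omega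
    have hmod : (4 * y + x) % 4 = x := by omega
    rw [hdiv, hmod, ← pvModify_merge]
    -- now unfold two loop iterations
    rw [pvMatLoopA, if_pos h]
    simp only [pvGetD_eq s i h]
    rw [if_neg (by decide : ¬ (0 + 1 = 2))]
    simp only []
    rw [if_neg (by omega : ¬ x = 4)]
    simp only []
    rw [if_neg (by omega : ¬ y = 4)]
    -- second iteration
    rw [pvMatLoopA, if_pos h1]
    simp only [pvGetD_eq s (i + 1) h1]
    norm_num
    by_cases hx3 : x + 1 = 4
    · rw [if_pos hx3]
      norm_num
      by_cases hy3 : y + 1 = 4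
      · rw [if_pos hy3]
        have h16 : 4 * y + x + 1 = 16 := by omega
        rw [h16, pvFill_16]
      · rw [if_neg hy3]
        rw [show i + 1 + 1 = i + 2 from rfl]
        rw [ih (i + 2) _ 0 (y + 1) (by omega) (by omega) (by omega) (by omega)]
        have he : 4 * (y + 1) + 0 = 4 * y + x + 1 := by omega
        rw [he]
    · rw [if_neg hx3]
      norm_num
      rw [if_neg (by omega : ¬ y = 4)]
      rw [show i + 1 + 1 = i + 2 from rfl]
      rw [ih (i + 2) _ (x + 1) y (by omega) (by omega) (by omega) hy]
      have he : 4 * y + (x + 1) = 4 * y + x + 1 := by omega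
      rw [he]

theorem pvCellsOf_take : ∀ (k : Nat) (t : List Char),
    pvCellsOf (t.take (2 * k)) = (pvCellsOf t).take k
  | 0, t => by simp [pvCellsOf]
  | k + 1, [] => by simp [pvCellsOf]
  | k + 1, [a] => by
    rw [List.take_of_length_le (by show 1 ≤ 2 * (k + 1); omega)]
    simp [show pvCellsOf [a] = [] from rfl]
  | k + 1, a :: b :: t => by
    have h : 2 * (k + 1) = 2 * k + 1 + 1 := by ring
    simp only [h, List.take_succ_cons, pvCellsOf, List.take_succ_cons]
    rw [pvCellsOf_take k t]

theorem pvFill_take : ∀ (cs : List (List Char)) (m : List (List (List Char))) (p : Nat),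
    pvFill m p cs = pvFill m p (cs.take (16 - p))
  | [], m, p => by simp
  | c :: cs, m, p => by
    by_cases hp : p < 16
    · have h16 : 16 - p = (16 - (p + 1)) + 1 := by omega
      rw [pvFill_step m p hp, h16, List.take_succ_cons, pvFill_step m p hp]
      exact pvFill_take cs _ (p + 1)
    · have hz : 16 - p = 0 := by omega
      simp [hz, pvFill, hp]

theorem pvCells_map_aux (u : List Char) (hu : u.length % 2 = 0) (i : Nat) (hi : i % 2 = 0) :
    (PySem.List.pyRange (i : Int) (u.length : Int) 2).map
        (fun j => PySem.List.slice u (some j) (some (j + 2)))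
      = pvCellsOf (u.drop i) := by
  by_cases h : i < u.length
  · have h1 : i + 1 < u.length := by omega
    have hsl : PySem.List.slice u (some (i : Int)) (some ((i : Int) + 2))
        = (u.drop i).take 2 := by
      have h2 : ((i : Int) + 2) = ((i : Int) + ((2 : Nat) : Int)) := by norm_num
      rw [h2, PySem.List.slice_natCast_add]
    rw [pvRange2_cons _ _ (by exact_mod_cast h), List.map_cons, hsl]
    rw [pvCast_two, pvCells_map_aux u hu (i + 2) (by omega)]
    have hd : u.drop i = u[i] :: u[i + 1] :: u.drop (i + 2) := by
      rw [List.drop_eq_getElem_cons h, List.drop_eq_getElem_cons h1]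
    rw [hd]
    exact rfl
  · rw [pvRange2_nil _ _ (by exact_mod_cast Nat.le_of_not_lt h),
      List.drop_eq_nil_of_le (by omega)]
    rfl
termination_by u.length - i

theorem pvReshape_eq_fill (cs : List (List Char)) (h : cs.length ≤ 16) :
    (PySem.List.pyRange 0 4 1).map (fun r =>
        (PySem.List.slice (cs ++ List.replicate (16 - cs.length) ([] : List Char))
          (some (4 * r)) (some (4 * r + 4))).map String.ofList)
      = (pvFill [[[], [], [], []], [[], [], [], []], [[], [], [], []], [[], [], [], []]] 0 cs).map
          (·.map String.ofList) := by
  have hr : PySem.List.pyRange 0 4 1 = [0, 1, 2, 3] := by decide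
  rw [hr]
  obtain _ | ⟨c0, cs⟩ := cs
  · rfl
  obtain _ | ⟨c1, cs⟩ := cs
  · rfl
  obtain _ | ⟨c2, cs⟩ := cs
  · rfl
  obtain _ | ⟨c3, cs⟩ := cs
  · rfl
  obtain _ | ⟨c4, cs⟩ := cs
  · rfl
  obtain _ | ⟨c5, cs⟩ := cs
  · rfl
  obtain _ | ⟨c6, cs⟩ := cs
  · rfl
  obtain _ | ⟨c7, cs⟩ := cs
  · rfl
  obtain _ | ⟨c8, cs⟩ := cs
  · rfl
  obtain _ | ⟨c9, cs⟩ := cs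
  · rfl
  obtain _ | ⟨c10, cs⟩ := cs
  · rfl
  obtain _ | ⟨c11, cs⟩ := cs
  · rfl
  obtain _ | ⟨c12, cs⟩ := cs
  · rfl
  obtain _ | ⟨c13, cs⟩ := cs
  · rfl
  obtain _ | ⟨c14, cs⟩ := cs
  · rfl
  obtain _ | ⟨c15, cs⟩ := cs
  · rfl
  obtain _ | ⟨c16, cs⟩ := cs
  · rfl
  · simp at h
    exact absurd h (by omega)

-- ===== VERDICT (by name: the statement is the Claim_ definition above) =====
theorem get_matrix_from_string_spec : Claim_equal_get_matrix_from_string := by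
  unfold Claim_equal_get_matrix_from_string Spec_get_matrix_from_string
  intro str _
  simp only [get_matrix_from_string, get_matrix_from_string_alt, pvBigIndianB_eq]
  have hte : (pvBigIndianA str.toList).length % 2 = 0 := pvBigIndianA_even _
  set t := pvBigIndianA str.toList with ht
  have h32 : PySem.List.slice t none (some 32) = t.take 32 := by
    rw [PySem.List.slice_to t (by norm_num)]
    rfl
  rw [h32]
  have htk : (t.take 32).length % 2 = 0 := by
    simp only [List.length_take]
    omega
  have hcells := pvCells_map_aux (t.take 32) htk 0 rfl
  simp only [Nat.cast_zero, List.drop_zero] at hcells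
  rw [hcells]
  rw [pvMatLoopA_spec t hte t.length 0 _ 0 0 (by omega) rfl (by norm_num) (by norm_num)]
  rw [List.drop_zero]
  rw [pvFill_take (pvCellsOf t) _ 0]
  have h160 : (16 : Nat) - 0 = 16 := rfl
  rw [h160]
  have h3216 : t.take 32 = t.take (2 * 16) := by norm_num
  rw [h3216, pvCellsOf_take 16 t]
  have hle : ((pvCellsOf t).take 16).length ≤ 16 := by
    simp [List.length_take]
  rw [← pvReshape_eq_fill _ hle]
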